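-- pv_equiv track=rewrite | github.com/bgeraci714/AoC22 | solutions/five.py | build_initial_state
-- ===== SOURCE A (Python) =====
-- def build_initial_state(stack_id_block, stacks_block):
--     stack_ids = stack_id_block.strip().split("   ")
--     state = {stack_id: [] for stack_id in stack_ids}
--     stacks_block.reverse()
--     for stack_id in state:
--
--         horizontal_index = stack_id_block.index(stack_id)
--         for line in stacks_block:
--             try:
--                 item = line[horizontal_index]
--                 if item != " ":
--                     state[stack_id].append(item)
--             except IndexError:
--                 # no need to process line
--                 # if there's no more values to process
--                 break
--
--     return state
-- ===== SOURCE B (Python) =====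
-- def build_initial_state(stack_id_block, stacks_block):
--     stack_ids = stack_id_block.strip().split("   ")
--     state = {stack_id: [] for stack_id in stack_ids}
--     stacks_block.reverse()
--     active = [(stack_id, stack_id_block.index(stack_id)) for stack_id in state]
--     for line in stacks_block:
--         still = []
--         for stack_id, column in active:
--             try:
--                 item = line[column]
--             except IndexError:
--                 continue  # this stack's column has ended; drop it from the active set
--             if item != " ":
--                 state[stack_id].append(item)
--             still.append((stack_id, column))
--         active = still
--     return state
-- ===== Notes on version B (the rewrite author's own statement) =====
-- stated objective: alternative
-- what changed: B replaces A's stack-major traversal (one scan of the reversed lines per stack, breaking on IndexError) by a single line-major pass over the reversed lines that maintains the list of still-active stacks, dropping a stack the first time its column falls off the end of a line.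
import Mathlib
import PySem

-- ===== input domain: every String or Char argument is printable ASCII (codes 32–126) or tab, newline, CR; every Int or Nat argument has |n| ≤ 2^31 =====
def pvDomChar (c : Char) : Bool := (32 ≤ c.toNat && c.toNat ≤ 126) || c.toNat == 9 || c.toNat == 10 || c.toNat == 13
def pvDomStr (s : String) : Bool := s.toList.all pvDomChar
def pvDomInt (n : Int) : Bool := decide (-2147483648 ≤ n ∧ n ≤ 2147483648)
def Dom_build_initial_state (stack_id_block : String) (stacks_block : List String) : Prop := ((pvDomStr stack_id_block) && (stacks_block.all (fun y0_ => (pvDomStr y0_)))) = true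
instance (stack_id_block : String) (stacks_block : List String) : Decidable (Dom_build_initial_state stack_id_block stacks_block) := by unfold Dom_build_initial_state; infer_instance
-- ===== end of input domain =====

-- B rebuilds the state in ONE pass over the (reversed) lines, maintaining the list of still-active
-- stacks, instead of A's one scan of the lines per stack (objective: alternative traversal).
-- Both A and B reverse stacks_block IN PLACE (same observable mutation); the equivalence proved
-- here is about the return value.

-- ===== PORT A =====
-- A's inner 'for line in stacks_block' loop: item = line[horizontal_index], append if not " ",
-- break on IndexError (PySem.Str.pyGet? = none)
def pvInnerA (lines : List String) (col : Int) (acc : List String) : List String :=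
  match lines with
  | [] => acc
  | line :: rest =>
    match PySem.Str.pyGet? line col with
    | none => acc
    | some c =>
      pvInnerA rest col (if String.singleton c ≠ " " then acc ++ [String.singleton c] else acc)

def build_initial_state (stack_id_block : String) (stacks_block : List String) : List (String × List String) :=
  let stack_ids := (PySem.Str.split? (PySem.Str.strip stack_id_block) "   ").getD []
  let state := stack_ids.foldl (fun d sid => d.insert sid ([] : List String))
    (PySem.Dict.mk ([] : List (String × List String)))
  let rev := stacks_block.reverse
  (state.keys.foldl
    (fun (d : PySem.Dict String (List String)) sid =>
      d.insert sid (pvInnerA rev (PySem.Str.find stack_id_block sid) (d.getD sid [])))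
    state).items

-- ===== PORT B =====
-- one line of B: iterate the active stacks, read line[column], keep a stack active only while
-- its column still exists on the line
def pvLineB (line : String) (p : PySem.Dict String (List String) × List (String × Int)) :
    PySem.Dict String (List String) × List (String × Int) :=
  p.2.foldl
    (fun (q : PySem.Dict String (List String) × List (String × Int)) sc =>
      match PySem.Str.pyGet? line sc.2 with
      | none => q
      | some c =>
        ((if String.singleton c ≠ " " then q.1.modify sc.1 [] (· ++ [String.singleton c]) else q.1),
         q.2 ++ [sc]))
    (p.1, ([] : List (String × Int)))

def build_initial_state_alt (stack_id_block : String) (stacks_block : List String) : List (String × List String) :=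
  let stack_ids := (PySem.Str.split? (PySem.Str.strip stack_id_block) "   ").getD []
  let state := stack_ids.foldl (fun d sid => d.insert sid ([] : List String))
    (PySem.Dict.mk ([] : List (String × List String)))
  let rev := stacks_block.reverse
  let active := state.keys.map (fun sid => (sid, PySem.Str.find stack_id_block sid))
  (rev.foldl (fun p line => pvLineB line p) (state, active)).1.items

-- ===== PRECONDITION & SPEC =====
def Spec_build_initial_state (stack_id_block : String) (stacks_block : List String) (out : List (String × List String)) : Prop := out = build_initial_state_alt stack_id_block stacks_block
instance (stack_id_block : String) (stacks_block : List String) (out : List (String × List String)) : Decidable (Spec_build_initial_state stack_id_block stacks_block out) := by unfold Spec_build_initial_state; infer_instance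

-- ===== CLAIM (what is proved, stated in full; the proofs are below) =====
def Claim_equal_build_initial_state : Prop := ∀ (stack_id_block : String) (stacks_block : List String), Dom_build_initial_state stack_id_block stacks_block → Spec_build_initial_state stack_id_block stacks_block (build_initial_state stack_id_block stacks_block)

-- ===== LEMMAS AND PROOFS =====

theorem pvInnerA_acc (lines : List String) (col : Int) (acc : List String) :
    pvInnerA lines col acc = acc ++ pvInnerA lines col [] := by
  induction lines generalizing acc with
  | nil => simp [pvInnerA]
  | cons line rest ih =>
    cases hc : PySem.Str.pyGet? line col with
    | none => simp only [pvInnerA, hc]; simp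
    | some c =>
      simp only [pvInnerA, hc]
      rw [ih, ih (if String.singleton c ≠ " " then [] ++ [String.singleton c] else [])]
      split_ifs <;> simp

theorem pvContains_iff {d : PySem.Dict String (List String)} {k : String} :
    d.contains k = true ↔ k ∈ d.items.map Prod.fst := by
  simp only [PySem.Dict.contains, List.any_eq_true, List.mem_map, beq_iff_eq]

theorem pvGetD_of_items_nil {d : PySem.Dict String (List String)}
    (h : ∀ kv ∈ d.items, kv.2 = ([] : List String)) (k : String) :
    d.getD k [] = [] := by
  simp only [PySem.Dict.getD, PySem.Dict.get?]
  cases hf : d.items.find? (fun p => p.1 == k) with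
  | none => rfl
  | some p => simpa using (h p (List.mem_of_find?_eq_some hf)) ▸ rfl

-- the first-matching item of a nodup-key item list is the item itself
theorem pvFind?_of_mem : ∀ (l : List (String × List String)) (kv : String × List String),
    (l.map Prod.fst).Nodup → kv ∈ l → l.find? (fun p => p.1 == kv.1) = some kv := by
  intro l
  induction l with
  | nil => intro kv _ h; simp at h
  | cons a rest ih =>
    intro kv hnd hm
    rcases List.mem_cons.mp hm with he | hm'
    · subst he; simp [List.find?]
    · have hne : (a.1 == kv.1) = false := by
        rw [beq_eq_false_iff_ne]
        intro he
        have : kv.1 ∈ rest.map Prod.fst := List.mem_map.mpr ⟨kv, hm', rfl⟩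
        exact (List.nodup_cons.mp hnd).1 (he ▸ this)
      rw [List.find?, hne]
      exact ih kv (List.nodup_cons.mp hnd).2 hm'

theorem pvGet?_of_mem {d : PySem.Dict String (List String)} {kv : String × List String}
    (hnd : (d.items.map Prod.fst).Nodup) (hm : kv ∈ d.items) :
    d.get? kv.1 = some kv.2 := by
  simp only [PySem.Dict.get?, pvFind?_of_mem d.items kv hnd hm, Option.map_some]

theorem pvItems_insert_of_contains' (d : PySem.Dict String (List String)) (k : String) (v : List String)
    (hc : d.contains k = true) :
    (d.insert k v).items = d.items.map (fun p => if p.1 = k then (p.1, v) else p) := by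
  rw [PySem.Dict.items_insert_of_contains d v hc]
  apply List.map_congr_left
  intro p _
  by_cases h : p.1 = k
  · simp [h]
  · simp [h, beq_eq_false_iff_ne.mpr h]

theorem pvMapFst_insert_of_contains (d : PySem.Dict String (List String)) (k : String) (v : List String)
    (hc : d.contains k = true) :
    (d.insert k v).items.map Prod.fst = d.items.map Prod.fst := by
  rw [pvItems_insert_of_contains' d k v hc, List.map_map]
  apply List.map_congr_left
  intro p _
  by_cases h : p.1 = k <;> simp [h]

theorem pvContains_insert_of_contains (d : PySem.Dict String (List String)) (k k' : String) (v : List String)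
    (hc : d.contains k = true) (hc' : d.contains k' = true) :
    (d.insert k v).contains k' = true := by
  rw [pvContains_iff, pvMapFst_insert_of_contains d k v hc]
  exact pvContains_iff.mp hc'

-- fromkeys invariant: all values are [] and keys are nodup
theorem pvFromkeys_inv :
    ∀ (xs : List String) (d : PySem.Dict String (List String)),
      (∀ kv ∈ d.items, kv.2 = ([] : List String)) → (d.items.map Prod.fst).Nodup →
      (∀ kv ∈ (xs.foldl (fun d s => d.insert s ([] : List String)) d).items, kv.2 = ([] : List String)) ∧
      ((xs.foldl (fun d s => d.insert s ([] : List String)) d).items.map Prod.fst).Nodup := by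
  intro xs
  induction xs with
  | nil => intro d h1 h2; exact ⟨h1, h2⟩
  | cons s rest ih =>
    intro d h1 h2
    simp only [List.foldl_cons]
    apply ih
    · intro kv hkv
      by_cases hc : d.contains s = true
      · rw [pvItems_insert_of_contains' d s [] hc] at hkv
        simp only [List.mem_map] at hkv
        obtain ⟨p, hp, he⟩ := hkv
        subst he
        split_ifs <;> simp_all [h1 p hp]
      · rw [PySem.Dict.insert, if_neg hc] at hkv
        rcases List.mem_append.mp hkv with h | h
        · exact h1 _ h
        · simp_all
    · by_cases hc : d.contains s = true
      · rw [pvMapFst_insert_of_contains d s [] hc]; exact h2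
      · rw [PySem.Dict.insert, if_neg hc]
        have hs : s ∉ d.items.map Prod.fst := fun hmem => hc (pvContains_iff.mpr hmem)
        simp only [List.map_append, List.map_cons, List.map_nil]
        refine List.Nodup.append h2 (List.nodup_singleton _) ?_
        rw [List.disjoint_singleton]
        exact hs

-- A's outer loop over the keys: each key gets its column's list
theorem pvFoldA_items (rev : List String) (sib : String) :
    ∀ (ks : List String) (d : PySem.Dict String (List String)),
      ks.Nodup → (∀ k ∈ ks, d.contains k = true) → (∀ k ∈ ks, d.getD k [] = []) →
      (ks.foldl (fun d sid => d.insert sid (pvInnerA rev (PySem.Str.find sib sid) (d.getD sid []))) d).items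
        = d.items.map (fun kv => if kv.1 ∈ ks then (kv.1, pvInnerA rev (PySem.Str.find sib kv.1) []) else kv) := by
  intro ks
  induction ks with
  | nil => intro d _ _ _; simp
  | cons sid rest ih =>
    intro d hnd hc hg
    simp only [List.foldl_cons]
    rw [hg sid (List.mem_cons_self ..)]
    rw [ih _ (List.nodup_cons.mp hnd).2
        (fun k hk => pvContains_insert_of_contains d sid k _ (hc sid (List.mem_cons_self ..)) (hc k (List.mem_cons_of_mem _ hk)))
        (fun k hk => by
          have hne : k ≠ sid := fun he => (List.nodup_cons.mp hnd).1 (he ▸ hk)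
          rw [PySem.Dict.getD_insert_of_ne _ _ _ hne]
          exact hg k (List.mem_cons_of_mem _ hk))]
    rw [pvItems_insert_of_contains' d sid _ (hc sid (List.mem_cons_self ..)), List.map_map]
    apply List.map_congr_left
    intro kv _
    by_cases he : kv.1 = sid
    · have hns : sid ∉ rest := (List.nodup_cons.mp hnd).1
      simp [Function.comp, he, hns]
    · simp [Function.comp, he, List.mem_cons]

theorem pvLookup_eq_none : ∀ (l : List (String × Int)) (k : String),
    k ∉ l.map Prod.fst → List.lookup k l = none := by
  intro l
  induction l with
  | nil => intro k _; rfl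
  | cons a rest ih =>
    intro k hk
    simp only [List.map_cons, List.mem_cons, not_or] at hk
    have hb : (k == a.1) = false := beq_eq_false_iff_ne.mpr hk.1
    simp only [List.lookup, hb]
    exact ih k hk.2

theorem pvLookup_filter {p : String × Int → Bool} :
    ∀ (l : List (String × Int)) (k : String), (l.map Prod.fst).Nodup →
      List.lookup k (l.filter p) = (List.lookup k l).bind (fun b => if p (k, b) then some b else none) := by
  intro l
  induction l with
  | nil => intro k _; rfl
  | cons a rest ih =>
    intro k hnd
    have hnd0 := List.nodup_cons.mp (by simpa only [List.map_cons] using hnd)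
    by_cases he : a.1 = k
    · have ht : (k == a.1) = true := beq_iff_eq.mpr he.symm
      have hnone : List.lookup k rest = none :=
        pvLookup_eq_none rest k (fun hm => hnd0.1 (he ▸ hm))
      have hka : (k, a.2) = a := by rw [← he]
      by_cases hp : p a = true
      · rw [List.filter_cons_of_pos hp]
        simp only [List.lookup, ht]
        simp [hka, hp]
      · rw [List.filter_cons_of_neg (by simpa using hp)]
        simp only [List.lookup, ht]
        rw [ih k hnd0.2, hnone]
        simp [hka, hp]
    · have hb : (k == a.1) = false := beq_eq_false_iff_ne.mpr (fun h => he h.symm)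
      by_cases hp : p a = true
      · rw [List.filter_cons_of_pos hp]
        simp only [List.lookup, hb]
        exact ih k hnd0.2
      · rw [List.filter_cons_of_neg (by simpa using hp)]
        simp only [List.lookup, hb]
        exact ih k hnd0.2

theorem pvLookup_map_self (f : String → Int) :
    ∀ (ks : List String) (k : String), k ∈ ks →
      List.lookup k (ks.map (fun s => (s, f s))) = some (f k) := by
  intro ks
  induction ks with
  | nil => intro k hk; simp at hk
  | cons a rest ih =>
    intro k hk
    by_cases h : a = k
    · subst h
      simp
    · have hb : (k == a) = false := beq_eq_false_iff_ne.mpr (fun hh => h hh.symm)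
      simp only [List.map_cons, List.lookup, hb]
      have h' : k ∈ rest := by
        cases List.mem_cons.mp hk with
        | inl h1 => exact absurd h1.symm h
        | inr h2 => exact h2
      exact ih k h'

-- one line of B, fully characterised
theorem pvLineB_spec (line : String) :
    ∀ (active : List (String × Int)) (st : PySem.Dict String (List String)) (still : List (String × Int)),
      (active.map Prod.fst).Nodup → (st.items.map Prod.fst).Nodup →
      (∀ sc ∈ active, st.contains sc.1 = true) →
      (active.foldl
        (fun (q : PySem.Dict String (List String) × List (String × Int)) sc =>
          match PySem.Str.pyGet? line sc.2 with
          | none => q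
          | some c =>
            ((if String.singleton c ≠ " " then q.1.modify sc.1 [] (· ++ [String.singleton c]) else q.1),
             q.2 ++ [sc]))
        (st, still))
      = (PySem.Dict.mk (st.items.map (fun kv =>
            match List.lookup kv.1 active with
            | some col =>
              match PySem.Str.pyGet? line col with
              | some c => (kv.1, kv.2 ++ (if String.singleton c ≠ " " then [String.singleton c] else []))
              | none => kv
            | none => kv)),
         still ++ active.filter (fun sc => (PySem.Str.pyGet? line sc.2).isSome)) := by
  intro active
  induction active with
  | nil =>
    intro st still _ _ _
    simp only [List.foldl_nil, List.lookup_nil, List.filter_nil, List.append_nil]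
    have : st.items.map (fun kv => kv) = st.items := List.map_id' st.items
    rw [this]
  | cons sc rest ih =>
    intro st still hndA hndI hcont
    have hndA0 := List.nodup_cons.mp (by simpa only [List.map_cons] using hndA)
    simp only [List.foldl_cons]
    cases hg : PySem.Str.pyGet? line sc.2 with
    | none =>
      rw [ih st still hndA0.2 hndI (fun x hx => hcont x (List.mem_cons_of_mem _ hx))]
      rw [List.filter_cons_of_neg (by show ¬(PySem.Str.pyGet? line sc.2).isSome = true; rw [hg]; simp)]
      refine Prod.ext ?_ rfl
      show PySem.Dict.mk _ = PySem.Dict.mk _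
      congr 1
      apply List.map_congr_left
      intro kv _
      by_cases he : kv.1 = sc.1
      · have ht : (kv.1 == sc.1) = true := beq_iff_eq.mpr he
        have hnone : List.lookup kv.1 rest = none :=
          pvLookup_eq_none rest kv.1 (fun hm => hndA0.1 (he ▸ hm))
        simp only [List.lookup, ht, hnone, hg]
      · have hb : (kv.1 == sc.1) = false := beq_eq_false_iff_ne.mpr he
        simp only [List.lookup, hb]
    | some c =>
      have hcsc : st.contains sc.1 = true := hcont sc (List.mem_cons_self ..)
      have hstep :
          (if String.singleton c ≠ " " then st.modify sc.1 [] (· ++ [String.singleton c]) else st).items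
            = st.items.map (fun kv => if kv.1 = sc.1
                then (kv.1, kv.2 ++ (if String.singleton c ≠ " " then [String.singleton c] else []))
                else kv) := by
        by_cases hsp : String.singleton c ≠ " "
        · rw [if_pos hsp]
          simp only [PySem.Dict.modify]
          rw [pvItems_insert_of_contains' st sc.1 _ hcsc]
          apply List.map_congr_left
          intro kv hkv
          by_cases hkv1 : kv.1 = sc.1
          · have hget : st.get? kv.1 = some kv.2 := pvGet?_of_mem hndI hkv
            rw [if_pos hkv1, if_pos hkv1, if_pos hsp]
            have : st.getD sc.1 [] = kv.2 := by
              rw [← hkv1]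
              simp [PySem.Dict.getD, hget]
            rw [this, hkv1]
          · rw [if_neg hkv1, if_neg hkv1]
        · rw [if_neg hsp]
          have hid : ∀ kv ∈ st.items,
              (if kv.1 = sc.1
                then (kv.1, kv.2 ++ (if String.singleton c ≠ " " then [String.singleton c] else []))
                else kv) = kv := by
            intro kv _
            split_ifs with h
            · simp
            · rfl
          rw [List.map_congr_left hid, List.map_id']
      set st' := (if String.singleton c ≠ " " then st.modify sc.1 [] (· ++ [String.singleton c]) else st) with hst'
      have hfst : st'.items.map Prod.fst = st.items.map Prod.fst := by
        rw [hstep, List.map_map]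
        apply List.map_congr_left
        intro kv _
        by_cases h : kv.1 = sc.1 <;> simp [h]
      rw [ih st' (still ++ [sc]) hndA0.2 (by rw [hfst]; exact hndI)
          (fun x hx => by
            rw [pvContains_iff, hfst]
            exact pvContains_iff.mp (hcont x (List.mem_cons_of_mem _ hx)))]
      rw [List.filter_cons_of_pos (by show (PySem.Str.pyGet? line sc.2).isSome = true; rw [hg]; rfl)]
      refine Prod.ext ?_ (by simp)
      show PySem.Dict.mk _ = PySem.Dict.mk _
      congr 1
      rw [hstep, List.map_map]
      apply List.map_congr_left
      intro kv _
      by_cases he : kv.1 = sc.1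
      · have ht : (kv.1 == sc.1) = true := beq_iff_eq.mpr he
        have hnone : List.lookup kv.1 rest = none :=
          pvLookup_eq_none rest kv.1 (fun hm => hndA0.1 (he ▸ hm))
        simp only [Function.comp, if_pos he, hnone, List.lookup, ht, hg]
      · have hb : (kv.1 == sc.1) = false := beq_eq_false_iff_ne.mpr he
        simp only [Function.comp, if_neg he, List.lookup, hb]

-- B's loop over the lines
theorem pvFoldB_items :
    ∀ (lines : List String) (st : PySem.Dict String (List String)) (active : List (String × Int)),
      (active.map Prod.fst).Nodup → (st.items.map Prod.fst).Nodup →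
      (∀ sc ∈ active, st.contains sc.1 = true) →
      ((lines.foldl (fun p line => pvLineB line p) (st, active)).1).items
        = st.items.map (fun kv =>
            match List.lookup kv.1 active with
            | some col => (kv.1, kv.2 ++ pvInnerA lines col [])
            | none => kv) := by
  intro lines
  induction lines with
  | nil =>
    intro st active _ _ _
    simp only [List.foldl_nil]
    have hid : ∀ kv ∈ st.items,
        (match List.lookup kv.1 active with
          | some col => (kv.1, kv.2 ++ pvInnerA [] col [])
          | none => kv) = kv := by
      intro kv _
      cases List.lookup kv.1 active <;> simp [pvInnerA]
    rw [List.map_congr_left hid, List.map_id']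
  | cons line rest ih =>
    intro st active hndA hndI hcont
    simp only [List.foldl_cons]
    have hline := pvLineB_spec line active st [] hndA hndI hcont
    have hpv : pvLineB line (st, active)
        = (PySem.Dict.mk (st.items.map (fun kv =>
              match List.lookup kv.1 active with
              | some col =>
                match PySem.Str.pyGet? line col with
                | some c => (kv.1, kv.2 ++ (if String.singleton c ≠ " " then [String.singleton c] else []))
                | none => kv
              | none => kv)),
           active.filter (fun sc => (PySem.Str.pyGet? line sc.2).isSome)) := by
      simp only [pvLineB]
      simpa using hline
    rw [hpv]
    set st' := PySem.Dict.mk (st.items.map (fun kv =>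
              match List.lookup kv.1 active with
              | some col =>
                match PySem.Str.pyGet? line col with
                | some c => (kv.1, kv.2 ++ (if String.singleton c ≠ " " then [String.singleton c] else []))
                | none => kv
              | none => kv)) with hst'
    have hfst : st'.items.map Prod.fst = st.items.map Prod.fst := by
      rw [hst']
      show (st.items.map _).map Prod.fst = _
      rw [List.map_map]
      apply List.map_congr_left
      intro kv _
      simp only [Function.comp_apply]
      cases hl : List.lookup kv.1 active with
      | none => rfl
      | some col => cases hgg : PySem.Str.pyGet? line col <;> simp only [hgg]
    have hsub : (active.filter (fun sc => (PySem.Str.pyGet? line sc.2).isSome)).Sublist active :=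
      List.filter_sublist
    have hndF : ((active.filter (fun sc => (PySem.Str.pyGet? line sc.2).isSome)).map Prod.fst).Nodup :=
      List.Nodup.sublist (List.Sublist.map Prod.fst hsub) hndA
    rw [ih st' _ hndF (by rw [hfst]; exact hndI)
        (fun x hx => by
          rw [pvContains_iff, hfst]
          exact pvContains_iff.mp (hcont x (List.mem_of_mem_filter hx)))]
    rw [hst']
    show (st.items.map _).map _ = _
    rw [List.map_map]
    apply List.map_congr_left
    intro kv _
    cases hl : List.lookup kv.1 active with
    | none =>
      have hthis : List.lookup kv.1 (active.filter (fun sc => (PySem.Str.pyGet? line sc.2).isSome)) = none := by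
        rw [pvLookup_filter active kv.1 hndA, hl]; rfl
      simp only [Function.comp, hl, hthis]
    | some col =>
      cases hg : PySem.Str.pyGet? line col with
      | none =>
        have hthis : List.lookup kv.1 (active.filter (fun sc => (PySem.Str.pyGet? line sc.2).isSome)) = none := by
          rw [pvLookup_filter active kv.1 hndA, hl]
          show (if (PySem.Str.pyGet? line col).isSome = true then some col else none) = none
          rw [hg]
          rfl
        simp only [Function.comp, hl, hg, hthis, pvInnerA]
        simp
      | some c =>
        have hlf : List.lookup kv.1 (active.filter (fun sc => (PySem.Str.pyGet? line sc.2).isSome)) = some col := by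
          rw [pvLookup_filter active kv.1 hndA, hl]
          show (if (PySem.Str.pyGet? line col).isSome = true then some col else none) = some col
          rw [hg]
          rfl
        simp only [Function.comp, hl, hg, hlf, pvInnerA]
        rw [pvInnerA_acc rest col (if String.singleton c ≠ " " then [] ++ [String.singleton c] else [])]
        split_ifs <;> simp

-- ===== VERDICT (by name: the statement is the Claim_ definition above) =====
theorem build_initial_state_spec : Claim_equal_build_initial_state := by
  intro sib sb _
  unfold Spec_build_initial_state build_initial_state build_initial_state_alt
  dsimp only
  obtain ⟨hvals, hnod⟩ := pvFromkeys_inv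
    ((PySem.Str.split? (PySem.Str.strip sib) "   ").getD [])
    (PySem.Dict.mk ([] : List (String × List String))) (by simp) (by simp)
  set st0 := ((PySem.Str.split? (PySem.Str.strip sib) "   ").getD []).foldl
      (fun d sid => d.insert sid ([] : List String))
      (PySem.Dict.mk ([] : List (String × List String))) with hst0
  have hkeys : st0.keys = st0.items.map Prod.fst := rfl
  rw [pvFoldA_items sb.reverse sib st0.keys st0 (by rw [hkeys]; exact hnod)
        (fun k hk => pvContains_iff.mpr (by rwa [hkeys] at hk))
        (fun k _ => pvGetD_of_items_nil hvals k)]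
  rw [pvFoldB_items sb.reverse st0 (st0.keys.map (fun sid => (sid, PySem.Str.find sib sid)))
        (by rw [List.map_map]
            have : (Prod.fst ∘ fun sid => (sid, PySem.Str.find sib sid)) = id := rfl
            rw [this, List.map_id, hkeys]; exact hnod)
        hnod
        (fun sc hsc => by
          obtain ⟨sid, hsid, he⟩ := List.mem_map.mp hsc
          exact pvContains_iff.mpr (by rw [← he]; rwa [hkeys] at hsid))]
  apply List.map_congr_left
  intro kv hkv
  have hk : kv.1 ∈ st0.keys := by rw [hkeys]; exact List.mem_map.mpr ⟨kv, hkv, rfl⟩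
  rw [pvLookup_map_self (fun sid => PySem.Str.find sib sid) st0.keys kv.1 hk]
  rw [if_pos hk]
  simp [hvals kv hkv]
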